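-- pv_equiv track=rewrite | github.com/SSAFY-6-1-3/Algorithm | 211111/s_5550_junh.py | frog
-- ===== SOURCE A (Python) =====
-- def frog(st):
--     checked = set()
--     idx = 0
--     frogs = 0
--     while True:
--         crocked = False
--         frogs +=1
--         for c in range(len(st)):
--             if c in checked: continue
--             if "croak"[idx] != st[c]: continue
--             checked.add(c)
--             idx += 1
--             if idx==5:
--                 idx=0
--                 crocked=True
--         if not crocked or idx:
--             return -1
--         if len(checked) == len(st):
--             return frogs
-- ===== SOURCE B (Python) =====
-- def frog(st):
--     wc = wr = wo = wa = 0
--     best = 0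
--     for ch in st:
--         if ch == 'c':
--             wc += 1
--             cur = wc + wr + wo + wa
--             if cur > best:
--                 best = cur
--         elif ch == 'r':
--             if wc == 0:
--                 return -1
--             wc -= 1; wr += 1
--         elif ch == 'o':
--             if wr == 0:
--                 return -1
--             wr -= 1; wo += 1
--         elif ch == 'a':
--             if wo == 0:
--                 return -1
--             wo -= 1; wa += 1
--         elif ch == 'k':
--             if wa == 0:
--                 return -1
--             wa -= 1
--         else:
--             return -1
--     if wc or wr or wo or wa:
--         return -1
--     return best
-- ===== Notes on version B (the rewrite author's own statement) =====
-- stated objective: faster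
-- what changed: replaced A's repeated whole-string greedy passes (one pass per frog, with a checked-index set) by a single O(n) scan keeping four stage counters and the running maximum of concurrently-croaking frogs
-- outside the precondition, e.g. on frog(''): A returns -1, B returns 0
import Mathlib
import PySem

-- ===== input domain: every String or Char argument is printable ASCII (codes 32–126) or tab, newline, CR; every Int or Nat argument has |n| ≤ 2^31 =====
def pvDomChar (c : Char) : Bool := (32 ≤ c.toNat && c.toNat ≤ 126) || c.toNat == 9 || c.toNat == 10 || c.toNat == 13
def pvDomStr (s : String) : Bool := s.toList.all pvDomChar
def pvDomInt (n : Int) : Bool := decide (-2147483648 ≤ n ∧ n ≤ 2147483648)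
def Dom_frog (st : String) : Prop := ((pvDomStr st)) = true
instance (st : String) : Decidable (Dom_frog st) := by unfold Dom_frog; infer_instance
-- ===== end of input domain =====

-- B replaces A's repeated whole-string greedy passes (one frog per pass) by a single left-to-right
-- scan with four stage counters and a running maximum of simultaneously-croaking frogs (O(n^2) → O(n)).

-- ===== PORT A =====
-- inner 'for c in range(len(st)):' loop, state (checked, idx, crocked)
def frogInner (st : String) : List Int → PySem.Set Int → Int → Bool → PySem.Set Int × Int × Bool
  | [], checked, idx, crocked => (checked, idx, crocked)
  | c :: cs, checked, idx, crocked =>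
    if PySem.Set.contains checked c then frogInner st cs checked idx crocked
    else if PySem.Str.pyGet? "croak" idx ≠ PySem.Str.pyGet? st c then frogInner st cs checked idx crocked
    else
      let checked := PySem.Set.add checked c
      let idx := idx + 1
      if idx = 5 then frogInner st cs checked 0 true
      else frogInner st cs checked idx crocked

-- 'while True:' loop; the fuel st.toList.length + 1 is an upper bound on the number of
-- iterations (each continuing iteration marks at least 5 new indices checked)
def frogLoop (st : String) : Nat → PySem.Set Int → Int → Int → Int
  | 0, _, _, _ => -1
  | fuel + 1, checked, idx, frogs =>
    let frogs := frogs + 1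
    match frogInner st (PySem.List.pyRange 0 (PySem.Str.len st) 1) checked idx false with
    | (checked, idx, crocked) =>
      if crocked = false ∨ idx ≠ 0 then -1
      else if PySem.Set.len checked = PySem.Str.len st then frogs
      else frogLoop st fuel checked idx frogs

def frog (st : String) : Int :=
  frogLoop st (st.toList.length + 1) PySem.Set.empty 0 0

-- ===== PORT B =====
def frogAltGo : List Char → Int → Int → Int → Int → Int → Int
  | [], wc, wr, wo, wa, best => if wc ≠ 0 ∨ wr ≠ 0 ∨ wo ≠ 0 ∨ wa ≠ 0 then -1 else best
  | ch :: t, wc, wr, wo, wa, best =>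
    if ch = 'c' then
      let wc := wc + 1
      let cur := wc + wr + wo + wa
      frogAltGo t wc wr wo wa (if cur > best then cur else best)
    else if ch = 'r' then
      if wc = 0 then -1 else frogAltGo t (wc - 1) (wr + 1) wo wa best
    else if ch = 'o' then
      if wr = 0 then -1 else frogAltGo t wc (wr - 1) (wo + 1) wa best
    else if ch = 'a' then
      if wo = 0 then -1 else frogAltGo t wc wr (wo - 1) (wa + 1) best
    else if ch = 'k' then
      if wa = 0 then -1 else frogAltGo t wc wr wo (wa - 1) best
    else -1

def frog_alt (st : String) : Int := frogAltGo st.toList 0 0 0 0 0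

-- ===== PRECONDITION & SPEC =====
-- Pre_ excludes only the empty string, a defensible corner on which the two values differ:
-- A returns -1 (its first pass completes no croak), B returns 0 (zero frogs suffice).
def Pre_frog (st : String) : Prop := st ≠ ""
instance (st : String) : Decidable (Pre_frog st) := by unfold Pre_frog; infer_instance

def pvWitness_frog : String := "croak"

def Spec_frog (st : String) (out : Int) : Prop := out = frog_alt st
instance (st : String) (out : Int) : Decidable (Spec_frog st out) := by unfold Spec_frog; infer_instance

-- ===== CLAIM (what is proved, stated in full; the proofs are below) =====
def Claim_equal_frog : Prop := ∀ (st : String), Dom_frog st → Pre_frog st → Spec_frog st (frog st)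

-- ===== LEMMAS AND PROOFS =====

-- the letter "croak"[idx] for idx ≤ 4
def croakIdx : Nat → Char
  | 0 => 'c' | 1 => 'r' | 2 => 'o' | 3 => 'a' | _ => 'k'

-- one greedy pass of A over the not-yet-checked characters, starting mid-pattern at idx:
-- returns (final idx, number of completed croaks, the skipped characters in order)
def cpass : Nat → List Char → Nat × Nat × List Char
  | idx, [] => (idx, 0, [])
  | idx, ch :: t =>
    if ch = croakIdx idx then
      if idx = 4 then ((cpass 0 t).1, (cpass 0 t).2.1 + 1, (cpass 0 t).2.2)
      else cpass (idx + 1) t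
    else ((cpass idx t).1, (cpass idx t).2.1, ch :: (cpass idx t).2.2)

-- the not-yet-checked characters of st at indices cs, in order
def residL (st : String) (cs : List Int) (checked : PySem.Set Int) : List Char :=
  (cs.filter (fun c => !PySem.Set.contains checked c)).filterMap (fun c => PySem.Str.pyGet? st c)

lemma pyGet?_croak (idx : Nat) (h : idx ≤ 4) :
    PySem.Str.pyGet? "croak" (idx : Int) = some (croakIdx idx) := by
  interval_cases idx <;> decide

lemma cpass_len (idx : Nat) (t : List Char) (h : idx ≤ 4) :
    idx ≤ 5 * (cpass idx t).2.1 + (cpass idx t).1 ∧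
    t.length + idx = (cpass idx t).2.2.length + 5 * (cpass idx t).2.1 + (cpass idx t).1 := by
  induction t generalizing idx with
  | nil => simp [cpass]
  | cons ch t ih =>
    by_cases hc : ch = croakIdx idx
    · by_cases h4 : idx = 4
      · have := ih 0 (by omega)
        simp [cpass, hc, h4]
        omega
      · have := ih (idx + 1) (by omega)
        simp [cpass, hc, h4]
        omega
    · have := ih idx h
      simp [cpass, hc]
      omega

-- one-step unfolding lemmas for the two scans
lemma alt_c (t : List Char) (wc wr wo wa b : Int) :
    frogAltGo ('c' :: t) wc wr wo wa b =
      frogAltGo t (wc + 1) wr wo wa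
        (if wc + 1 + wr + wo + wa > b then wc + 1 + wr + wo + wa else b) := by
  simp [frogAltGo]

lemma alt_r (t : List Char) (wc wr wo wa b : Int) :
    frogAltGo ('r' :: t) wc wr wo wa b =
      if wc = 0 then -1 else frogAltGo t (wc - 1) (wr + 1) wo wa b := by
  simp [frogAltGo]

lemma alt_o (t : List Char) (wc wr wo wa b : Int) :
    frogAltGo ('o' :: t) wc wr wo wa b =
      if wr = 0 then -1 else frogAltGo t wc (wr - 1) (wo + 1) wa b := by
  simp [frogAltGo]

lemma alt_a (t : List Char) (wc wr wo wa b : Int) :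
    frogAltGo ('a' :: t) wc wr wo wa b =
      if wo = 0 then -1 else frogAltGo t wc wr (wo - 1) (wa + 1) b := by
  simp [frogAltGo]

lemma alt_k (t : List Char) (wc wr wo wa b : Int) :
    frogAltGo ('k' :: t) wc wr wo wa b =
      if wa = 0 then -1 else frogAltGo t wc wr wo (wa - 1) b := by
  simp [frogAltGo]

lemma alt_other (ch : Char) (t : List Char) (wc wr wo wa b : Int)
    (h1 : ch ≠ 'c') (h2 : ch ≠ 'r') (h3 : ch ≠ 'o') (h4 : ch ≠ 'a') (h5 : ch ≠ 'k') :
    frogAltGo (ch :: t) wc wr wo wa b = -1 := by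
  simp [frogAltGo, h1, h2, h3, h4, h5]

lemma cpass_consume (idx : Nat) (ch : Char) (t : List Char) (h : ch = croakIdx idx) (h4 : idx ≠ 4) :
    cpass idx (ch :: t) = cpass (idx + 1) t := by
  simp [cpass, h, h4]

lemma cpass_consume4 (ch : Char) (t : List Char) (h : ch = croakIdx 4) :
    cpass 4 (ch :: t) = ((cpass 0 t).1, (cpass 0 t).2.1 + 1, (cpass 0 t).2.2) := by
  simp [cpass, h]

lemma cpass_skip (idx : Nat) (ch : Char) (t : List Char) (h : ch ≠ croakIdx idx) :
    cpass idx (ch :: t) = ((cpass idx t).1, (cpass idx t).2.1, ch :: (cpass idx t).2.2) := by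
  simp [cpass, h]

lemma cpass_skip_1 (idx : Nat) (ch : Char) (t : List Char) (h : ch ≠ croakIdx idx) :
    (cpass idx (ch :: t)).1 = (cpass idx t).1 := by
  rw [cpass_skip idx ch t h]

lemma cpass_skip_22 (idx : Nat) (ch : Char) (t : List Char) (h : ch ≠ croakIdx idx) :
    (cpass idx (ch :: t)).2.2 = ch :: (cpass idx t).2.2 := by
  rw [cpass_skip idx ch t h]

lemma cpass4_1 (ch : Char) (t : List Char) (h : ch = croakIdx 4) :
    (cpass 4 (ch :: t)).1 = (cpass 0 t).1 := by
  rw [cpass_consume4 ch t h]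

lemma cpass4_22 (ch : Char) (t : List Char) (h : ch = croakIdx 4) :
    (cpass 4 (ch :: t)).2.2 = (cpass 0 t).2.2 := by
  rw [cpass_consume4 ch t h]

-- ===== the single-pass/greedy correspondence (core invariant) =====
lemma core (t : List Char) (idx : Nat) (wc wr wo wa bl : Int)
    (hidx : idx ≤ 4) (h1 : 0 ≤ wc) (h2 : 0 ≤ wr) (h3 : 0 ≤ wo) (h4 : 0 ≤ wa)
    (hb : wc + wr + wo + wa + 1 ≤ bl) :
    frogAltGo t (wc + (if idx = 1 then 1 else 0)) (wr + (if idx = 2 then 1 else 0))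
      (wo + (if idx = 3 then 1 else 0)) (wa + (if idx = 4 then 1 else 0)) bl =
    if (cpass idx t).1 ≠ 0 ∨ frogAltGo (cpass idx t).2.2 wc wr wo wa (bl - 1) = -1 then -1
    else frogAltGo (cpass idx t).2.2 wc wr wo wa (bl - 1) + 1 := by
  revert hidx h1 h2 h3 h4 hb
  induction t generalizing idx wc wr wo wa bl with
  | nil =>
    intro hidx h1 h2 h3 h4 hb
    interval_cases idx <;> simp [cpass, frogAltGo] <;> intros <;> omega
  | cons ch t ih =>
    intro hidx h1 h2 h3 h4 hb
    interval_cases idx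
    · -- idx = 0
      try simp only [Nat.reduceEqDiff, reduceIte, Nat.reduceAdd, add_zero]
      by_cases hcc : ch = 'c'
      · subst hcc
        rw [cpass_consume 0 'c' t rfl (by omega), alt_c, if_neg (show ¬(wc + 1 + wr + wo + wa > bl) by omega)]
        have H := ih 1 wc wr wo wa bl (by omega) h1 h2 h3 h4 hb
        try simp only [Nat.reduceEqDiff, reduceIte, Nat.reduceAdd, add_zero] at H ⊢
        exact H
      · by_cases hcr : ch = 'r'
        · subst hcr
          rw [cpass_skip_1 0 'r' t (by decide), cpass_skip_22 0 'r' t (by decide), alt_r, alt_r]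
          by_cases hz : wc = 0
          · simp [hz]
          · simp only [if_neg hz]
            have H := ih 0 (wc - 1) (wr + 1) wo wa bl (by omega) (by omega) (by omega) h3 h4 (by omega)
            try simp only [Nat.reduceEqDiff, reduceIte, Nat.reduceAdd, add_zero] at H ⊢
            exact H
        · by_cases hco : ch = 'o'
          · subst hco
            rw [cpass_skip_1 0 'o' t (by decide), cpass_skip_22 0 'o' t (by decide), alt_o, alt_o]
            by_cases hz : wr = 0
            · simp [hz]
            · simp only [if_neg hz]
              have H := ih 0 wc (wr - 1) (wo + 1) wa bl (by omega) h1 (by omega) (by omega) h4 (by omega)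
              try simp only [Nat.reduceEqDiff, reduceIte, Nat.reduceAdd, add_zero] at H ⊢
              exact H
          · by_cases hca : ch = 'a'
            · subst hca
              rw [cpass_skip_1 0 'a' t (by decide), cpass_skip_22 0 'a' t (by decide), alt_a, alt_a]
              by_cases hz : wo = 0
              · simp [hz]
              · simp only [if_neg hz]
                have H := ih 0 wc wr (wo - 1) (wa + 1) bl (by omega) h1 h2 (by omega) (by omega) (by omega)
                try simp only [Nat.reduceEqDiff, reduceIte, Nat.reduceAdd, add_zero] at H ⊢
                exact H
            · by_cases hck : ch = 'k'
              · subst hck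
                rw [cpass_skip_1 0 'k' t (by decide), cpass_skip_22 0 'k' t (by decide), alt_k, alt_k]
                by_cases hz : wa = 0
                · simp [hz]
                · simp only [if_neg hz]
                  have H := ih 0 wc wr wo (wa - 1) bl (by omega) h1 h2 h3 (by omega) (by omega)
                  try simp only [Nat.reduceEqDiff, reduceIte, Nat.reduceAdd, add_zero] at H ⊢
                  exact H
              · rw [cpass_skip_1 0 ch t (show ch ≠ croakIdx 0 from hcc), cpass_skip_22 0 ch t (show ch ≠ croakIdx 0 from hcc)]
                rw [alt_other ch t _ _ _ _ _ hcc hcr hco hca hck, alt_other ch _ _ _ _ _ _ hcc hcr hco hca hck]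
                simp
    · -- idx = 1
      try simp only [Nat.reduceEqDiff, reduceIte, Nat.reduceAdd, add_zero]
      by_cases hcc : ch = 'c'
      · subst hcc
        rw [cpass_skip_1 1 'c' t (by decide), cpass_skip_22 1 'c' t (by decide), alt_c, alt_c]
        have H := ih 1 (wc + 1) wr wo wa (if wc + 1 + 1 + wr + wo + wa > bl then wc + 1 + 1 + wr + wo + wa else bl) (by omega) (by omega) h2 h3 h4 (by split_ifs <;> omega)
        try simp only [Nat.reduceEqDiff, reduceIte, Nat.reduceAdd, add_zero] at H ⊢
        have e : (if wc + 1 + 1 + wr + wo + wa > bl then wc + 1 + 1 + wr + wo + wa else bl) - 1 = (if wc + 1 + wr + wo + wa > bl - 1 then wc + 1 + wr + wo + wa else bl - 1) := by split_ifs <;> omega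
        rw [e] at H
        exact H
      · by_cases hcr : ch = 'r'
        · subst hcr
          rw [cpass_consume 1 'r' t rfl (by omega), alt_r, if_neg (show ¬(wc + 1 = 0) by omega)]
          have e : wc + 1 - 1 = wc := by omega
          rw [e]
          have H := ih 2 wc wr wo wa bl (by omega) h1 h2 h3 h4 hb
          try simp only [Nat.reduceEqDiff, reduceIte, Nat.reduceAdd, add_zero] at H ⊢
          exact H
        · by_cases hco : ch = 'o'
          · subst hco
            rw [cpass_skip_1 1 'o' t (by decide), cpass_skip_22 1 'o' t (by decide), alt_o, alt_o]
            by_cases hz : wr = 0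
            · simp [hz]
            · simp only [if_neg hz]
              have H := ih 1 wc (wr - 1) (wo + 1) wa bl (by omega) h1 (by omega) (by omega) h4 (by omega)
              try simp only [Nat.reduceEqDiff, reduceIte, Nat.reduceAdd, add_zero] at H ⊢
              exact H
          · by_cases hca : ch = 'a'
            · subst hca
              rw [cpass_skip_1 1 'a' t (by decide), cpass_skip_22 1 'a' t (by decide), alt_a, alt_a]
              by_cases hz : wo = 0
              · simp [hz]
              · simp only [if_neg hz]
                have H := ih 1 wc wr (wo - 1) (wa + 1) bl (by omega) h1 h2 (by omega) (by omega) (by omega)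
                try simp only [Nat.reduceEqDiff, reduceIte, Nat.reduceAdd, add_zero] at H ⊢
                exact H
            · by_cases hck : ch = 'k'
              · subst hck
                rw [cpass_skip_1 1 'k' t (by decide), cpass_skip_22 1 'k' t (by decide), alt_k, alt_k]
                by_cases hz : wa = 0
                · simp [hz]
                · simp only [if_neg hz]
                  have H := ih 1 wc wr wo (wa - 1) bl (by omega) h1 h2 h3 (by omega) (by omega)
                  try simp only [Nat.reduceEqDiff, reduceIte, Nat.reduceAdd, add_zero] at H ⊢
                  exact H
              · rw [cpass_skip_1 1 ch t (show ch ≠ croakIdx 1 from hcr), cpass_skip_22 1 ch t (show ch ≠ croakIdx 1 from hcr)]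
                rw [alt_other ch t _ _ _ _ _ hcc hcr hco hca hck, alt_other ch _ _ _ _ _ _ hcc hcr hco hca hck]
                simp
    · -- idx = 2
      try simp only [Nat.reduceEqDiff, reduceIte, Nat.reduceAdd, add_zero]
      by_cases hcc : ch = 'c'
      · subst hcc
        rw [cpass_skip_1 2 'c' t (by decide), cpass_skip_22 2 'c' t (by decide), alt_c, alt_c]
        have H := ih 2 (wc + 1) wr wo wa (if wc + 1 + (wr + 1) + wo + wa > bl then wc + 1 + (wr + 1) + wo + wa else bl) (by omega) (by omega) h2 h3 h4 (by split_ifs <;> omega)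
        try simp only [Nat.reduceEqDiff, reduceIte, Nat.reduceAdd, add_zero] at H ⊢
        have e : (if wc + 1 + (wr + 1) + wo + wa > bl then wc + 1 + (wr + 1) + wo + wa else bl) - 1 = (if wc + 1 + wr + wo + wa > bl - 1 then wc + 1 + wr + wo + wa else bl - 1) := by split_ifs <;> omega
        rw [e] at H
        exact H
      · by_cases hcr : ch = 'r'
        · subst hcr
          rw [cpass_skip_1 2 'r' t (by decide), cpass_skip_22 2 'r' t (by decide), alt_r, alt_r]
          by_cases hz : wc = 0
          · simp [hz]
          · simp only [if_neg hz]
            have H := ih 2 (wc - 1) (wr + 1) wo wa bl (by omega) (by omega) (by omega) h3 h4 (by omega)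
            try simp only [Nat.reduceEqDiff, reduceIte, Nat.reduceAdd, add_zero] at H ⊢
            exact H
        · by_cases hco : ch = 'o'
          · subst hco
            rw [cpass_consume 2 'o' t rfl (by omega), alt_o, if_neg (show ¬(wr + 1 = 0) by omega)]
            have e : wr + 1 - 1 = wr := by omega
            rw [e]
            have H := ih 3 wc wr wo wa bl (by omega) h1 h2 h3 h4 hb
            try simp only [Nat.reduceEqDiff, reduceIte, Nat.reduceAdd, add_zero] at H ⊢
            exact H
          · by_cases hca : ch = 'a'
            · subst hca
              rw [cpass_skip_1 2 'a' t (by decide), cpass_skip_22 2 'a' t (by decide), alt_a, alt_a]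
              by_cases hz : wo = 0
              · simp [hz]
              · simp only [if_neg hz]
                have H := ih 2 wc wr (wo - 1) (wa + 1) bl (by omega) h1 h2 (by omega) (by omega) (by omega)
                try simp only [Nat.reduceEqDiff, reduceIte, Nat.reduceAdd, add_zero] at H ⊢
                exact H
            · by_cases hck : ch = 'k'
              · subst hck
                rw [cpass_skip_1 2 'k' t (by decide), cpass_skip_22 2 'k' t (by decide), alt_k, alt_k]
                by_cases hz : wa = 0
                · simp [hz]
                · simp only [if_neg hz]
                  have H := ih 2 wc wr wo (wa - 1) bl (by omega) h1 h2 h3 (by omega) (by omega)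
                  try simp only [Nat.reduceEqDiff, reduceIte, Nat.reduceAdd, add_zero] at H ⊢
                  exact H
              · rw [cpass_skip_1 2 ch t (show ch ≠ croakIdx 2 from hco), cpass_skip_22 2 ch t (show ch ≠ croakIdx 2 from hco)]
                rw [alt_other ch t _ _ _ _ _ hcc hcr hco hca hck, alt_other ch _ _ _ _ _ _ hcc hcr hco hca hck]
                simp
    · -- idx = 3
      try simp only [Nat.reduceEqDiff, reduceIte, Nat.reduceAdd, add_zero]
      by_cases hcc : ch = 'c'
      · subst hcc
        rw [cpass_skip_1 3 'c' t (by decide), cpass_skip_22 3 'c' t (by decide), alt_c, alt_c]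
        have H := ih 3 (wc + 1) wr wo wa (if wc + 1 + wr + (wo + 1) + wa > bl then wc + 1 + wr + (wo + 1) + wa else bl) (by omega) (by omega) h2 h3 h4 (by split_ifs <;> omega)
        try simp only [Nat.reduceEqDiff, reduceIte, Nat.reduceAdd, add_zero] at H ⊢
        have e : (if wc + 1 + wr + (wo + 1) + wa > bl then wc + 1 + wr + (wo + 1) + wa else bl) - 1 = (if wc + 1 + wr + wo + wa > bl - 1 then wc + 1 + wr + wo + wa else bl - 1) := by split_ifs <;> omega
        rw [e] at H
        exact H
      · by_cases hcr : ch = 'r'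
        · subst hcr
          rw [cpass_skip_1 3 'r' t (by decide), cpass_skip_22 3 'r' t (by decide), alt_r, alt_r]
          by_cases hz : wc = 0
          · simp [hz]
          · simp only [if_neg hz]
            have H := ih 3 (wc - 1) (wr + 1) wo wa bl (by omega) (by omega) (by omega) h3 h4 (by omega)
            try simp only [Nat.reduceEqDiff, reduceIte, Nat.reduceAdd, add_zero] at H ⊢
            exact H
        · by_cases hco : ch = 'o'
          · subst hco
            rw [cpass_skip_1 3 'o' t (by decide), cpass_skip_22 3 'o' t (by decide), alt_o, alt_o]
            by_cases hz : wr = 0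
            · simp [hz]
            · simp only [if_neg hz]
              have H := ih 3 wc (wr - 1) (wo + 1) wa bl (by omega) h1 (by omega) (by omega) h4 (by omega)
              try simp only [Nat.reduceEqDiff, reduceIte, Nat.reduceAdd, add_zero] at H ⊢
              exact H
          · by_cases hca : ch = 'a'
            · subst hca
              rw [cpass_consume 3 'a' t rfl (by omega), alt_a, if_neg (show ¬(wo + 1 = 0) by omega)]
              have e : wo + 1 - 1 = wo := by omega
              rw [e]
              have H := ih 4 wc wr wo wa bl (by omega) h1 h2 h3 h4 hb
              try simp only [Nat.reduceEqDiff, reduceIte, Nat.reduceAdd, add_zero] at H ⊢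
              exact H
            · by_cases hck : ch = 'k'
              · subst hck
                rw [cpass_skip_1 3 'k' t (by decide), cpass_skip_22 3 'k' t (by decide), alt_k, alt_k]
                by_cases hz : wa = 0
                · simp [hz]
                · simp only [if_neg hz]
                  have H := ih 3 wc wr wo (wa - 1) bl (by omega) h1 h2 h3 (by omega) (by omega)
                  try simp only [Nat.reduceEqDiff, reduceIte, Nat.reduceAdd, add_zero] at H ⊢
                  exact H
              · rw [cpass_skip_1 3 ch t (show ch ≠ croakIdx 3 from hca), cpass_skip_22 3 ch t (show ch ≠ croakIdx 3 from hca)]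
                rw [alt_other ch t _ _ _ _ _ hcc hcr hco hca hck, alt_other ch _ _ _ _ _ _ hcc hcr hco hca hck]
                simp
    · -- idx = 4
      try simp only [Nat.reduceEqDiff, reduceIte, Nat.reduceAdd, add_zero]
      by_cases hcc : ch = 'c'
      · subst hcc
        rw [cpass_skip_1 4 'c' t (by decide), cpass_skip_22 4 'c' t (by decide), alt_c, alt_c]
        have H := ih 4 (wc + 1) wr wo wa (if wc + 1 + wr + wo + (wa + 1) > bl then wc + 1 + wr + wo + (wa + 1) else bl) (by omega) (by omega) h2 h3 h4 (by split_ifs <;> omega)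
        try simp only [Nat.reduceEqDiff, reduceIte, Nat.reduceAdd, add_zero] at H ⊢
        have e : (if wc + 1 + wr + wo + (wa + 1) > bl then wc + 1 + wr + wo + (wa + 1) else bl) - 1 = (if wc + 1 + wr + wo + wa > bl - 1 then wc + 1 + wr + wo + wa else bl - 1) := by split_ifs <;> omega
        rw [e] at H
        exact H
      · by_cases hcr : ch = 'r'
        · subst hcr
          rw [cpass_skip_1 4 'r' t (by decide), cpass_skip_22 4 'r' t (by decide), alt_r, alt_r]
          by_cases hz : wc = 0
          · simp [hz]
          · simp only [if_neg hz]
            have H := ih 4 (wc - 1) (wr + 1) wo wa bl (by omega) (by omega) (by omega) h3 h4 (by omega)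
            try simp only [Nat.reduceEqDiff, reduceIte, Nat.reduceAdd, add_zero] at H ⊢
            exact H
        · by_cases hco : ch = 'o'
          · subst hco
            rw [cpass_skip_1 4 'o' t (by decide), cpass_skip_22 4 'o' t (by decide), alt_o, alt_o]
            by_cases hz : wr = 0
            · simp [hz]
            · simp only [if_neg hz]
              have H := ih 4 wc (wr - 1) (wo + 1) wa bl (by omega) h1 (by omega) (by omega) h4 (by omega)
              try simp only [Nat.reduceEqDiff, reduceIte, Nat.reduceAdd, add_zero] at H ⊢
              exact H
          · by_cases hca : ch = 'a'
            · subst hca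
              rw [cpass_skip_1 4 'a' t (by decide), cpass_skip_22 4 'a' t (by decide), alt_a, alt_a]
              by_cases hz : wo = 0
              · simp [hz]
              · simp only [if_neg hz]
                have H := ih 4 wc wr (wo - 1) (wa + 1) bl (by omega) h1 h2 (by omega) (by omega) (by omega)
                try simp only [Nat.reduceEqDiff, reduceIte, Nat.reduceAdd, add_zero] at H ⊢
                exact H
            · by_cases hck : ch = 'k'
              · subst hck
                rw [cpass4_1 'k' t rfl, cpass4_22 'k' t rfl, alt_k, if_neg (show ¬(wa + 1 = 0) by omega)]
                have e : wa + 1 - 1 = wa := by omega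
                rw [e]
                have H := ih 0 wc wr wo wa bl (by omega) h1 h2 h3 h4 hb
                try simp only [Nat.reduceEqDiff, reduceIte, Nat.reduceAdd, add_zero] at H ⊢
                exact H
              · rw [cpass_skip_1 4 ch t (show ch ≠ croakIdx 4 from hck), cpass_skip_22 4 ch t (show ch ≠ croakIdx 4 from hck)]
                rw [alt_other ch t _ _ _ _ _ hcc hcr hco hca hck, alt_other ch _ _ _ _ _ _ hcc hcr hco hca hck]
                simp

-- the top-level form of the core lemma, for a string starting with 'c'
lemma topcore (t : List Char) :
    frogAltGo ('c' :: t) 0 0 0 0 0 =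
      if (cpass 0 ('c' :: t)).1 ≠ 0 ∨ frogAltGo (cpass 0 ('c' :: t)).2.2 0 0 0 0 0 = -1 then -1
      else frogAltGo (cpass 0 ('c' :: t)).2.2 0 0 0 0 0 + 1 := by
  have h := core t 1 0 0 0 0 1 (by omega) le_rfl le_rfl le_rfl le_rfl (by omega)
  simp only [cpass, croakIdx] at *
  simpa using h

lemma headNe (ch : Char) (t : List Char) (h : ch ≠ 'c') :
    frogAltGo (ch :: t) 0 0 0 0 0 = -1 := by
  simp only [frogAltGo, if_neg h]
  split_ifs <;> simp_all

-- ===== the bridge: A's checked-set fold is the pass over the unchecked characters =====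
lemma bridge (st : String) (cs : List Int) (checked : PySem.Set Int) (idx : Nat) (crocked : Bool)
    (hidx : idx ≤ 4) (hnd : cs.Nodup) (hin : ∀ c ∈ cs, (PySem.Str.pyGet? st c).isSome) :
    ∃ checked' : PySem.Set Int,
      frogInner st cs checked (idx : Int) crocked =
        (checked', ((cpass idx (residL st cs checked)).1 : Int),
          crocked || decide (0 < (cpass idx (residL st cs checked)).2.1)) ∧
      (∀ x : Int, x ∈ checked → x ∈ checked') ∧
      (∀ x : Int, x ∉ cs → (x ∈ checked' ↔ x ∈ checked)) ∧
      residL st cs checked' = (cpass idx (residL st cs checked)).2.2 ∧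
      checked'.length + (cpass idx (residL st cs checked)).2.2.length
        = checked.length + (residL st cs checked).length := by
  induction cs generalizing checked idx crocked with
  | nil =>
    exact ⟨checked, by simp [frogInner, residL, cpass], fun x h => h, fun x _ => Iff.rfl,
      by simp [residL, cpass], by simp [residL, cpass]⟩
  | cons c cs ih =>
    obtain ⟨hc_notin, hnd'⟩ : c ∉ cs ∧ cs.Nodup := by
      constructor
      · exact (List.nodup_cons.mp hnd).1
      · exact (List.nodup_cons.mp hnd).2
    obtain ⟨ch, hch⟩ : ∃ ch, PySem.Str.pyGet? st c = some ch :=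
      Option.isSome_iff_exists.mp (hin c (by simp))
    have hin' : ∀ x ∈ cs, (PySem.Str.pyGet? st x).isSome := fun x hx => hin x (by simp [hx])
    have hch2 : PySem.List.pyGet? st.toList c = some ch := by simpa [PySem.Str.pyGet?] using hch
    by_cases hmem : c ∈ checked
    · -- index already checked: skipped by both sides
      obtain ⟨checked', heq, hmono, hout, hres, hlen⟩ := ih checked idx crocked hidx hnd' hin'
      have hres0 : residL st (c :: cs) checked = residL st cs checked := by
        simp [residL, hmem]
      have hmem' : c ∈ checked' := hmono c hmem
      refine ⟨checked', ?_, hmono, ?_, ?_, ?_⟩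
      · rw [hres0]
        rw [show frogInner st (c :: cs) checked (↑idx) crocked
              = frogInner st cs checked (↑idx) crocked by simp [frogInner, hmem]]
        exact heq
      · intro x hx
        exact hout x (fun hx' => hx (by simp [hx']))
      · rw [hres0, show residL st (c :: cs) checked' = residL st cs checked' by
          simp [residL, hmem']]
        exact hres
      · rw [hres0]; exact hlen
    · have hres0 : residL st (c :: cs) checked = ch :: residL st cs checked := by
        simp [residL, hmem, hch2]
      by_cases hcroak : croakIdx idx = ch
      · -- consumed: c is marked checked, idx advances
        have hmemadd : c ∈ PySem.Set.add checked c := by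
          rw [PySem.Set.mem_add]; exact Or.inr rfl
        have hresadd : residL st cs (PySem.Set.add checked c) = residL st cs checked := by
          unfold residL
          congr 1
          apply List.filter_congr
          intro x hx
          have hxc : x ≠ c := fun e => hc_notin (e ▸ hx)
          simp [PySem.Set.contains, PySem.Set.mem_add, hxc]
        have hlenadd : (PySem.Set.add checked c).length = checked.length + 1 := by
          rw [PySem.Set.add_of_not_mem hmem, List.length_append]
          rfl
        have hstep : frogInner st (c :: cs) checked (↑idx) crocked
            = if ((idx : Int) + 1 = 5)
              then frogInner st cs (PySem.Set.add checked c) 0 true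
              else frogInner st cs (PySem.Set.add checked c) ((idx : Int) + 1) crocked := by
          rw [show frogInner st (c :: cs) checked (↑idx) crocked
              = (if PySem.Set.contains checked c then frogInner st cs checked (↑idx) crocked
                 else if PySem.Str.pyGet? "croak" (↑idx) ≠ PySem.Str.pyGet? st c
                 then frogInner st cs checked (↑idx) crocked
                 else if ((idx : Int) + 1 = 5)
                      then frogInner st cs (PySem.Set.add checked c) 0 true
                      else frogInner st cs (PySem.Set.add checked c) ((idx : Int) + 1) crocked)
              from rfl]
          rw [pyGet?_croak idx hidx, hch, hcroak]
          simp [hmem]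
        by_cases h4 : idx = 4
        · subst h4
          obtain ⟨checked', heq, hmono, hout, hres, hlen⟩ :=
            ih (PySem.Set.add checked c) 0 true (by omega) hnd' hin'
          rw [hresadd] at heq hres hlen
          have hpass := cpass_consume4 ch (residL st cs checked) hcroak.symm
          refine ⟨checked', ?_, ?_, ?_, ?_, ?_⟩
          · simp only [Nat.cast_zero] at heq
            rw [hstep, if_pos (by norm_num), heq, hres0, hpass]
            simp
          · intro x hx
            exact hmono x (by rw [PySem.Set.mem_add]; exact Or.inl hx)
          · intro x hx
            have hxc : x ≠ c := fun e => hx (by simp [e])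
            rw [hout x (fun hx' => hx (by simp [hx'])), PySem.Set.mem_add]
            simp [hxc]
          · rw [hres0, hpass, show residL st (c :: cs) checked' = residL st cs checked' by
              simp [residL, hmono c hmemadd]]
            exact hres
          · rw [hres0, hpass]
            simp only [List.length_cons]
            omega
        · obtain ⟨checked', heq, hmono, hout, hres, hlen⟩ :=
            ih (PySem.Set.add checked c) (idx + 1) crocked (by omega) hnd' hin'
          rw [hresadd] at heq hres hlen
          have hpass := cpass_consume idx ch (residL st cs checked) hcroak.symm h4
          refine ⟨checked', ?_, ?_, ?_, ?_, ?_⟩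
          · rw [hstep, if_neg (by omega), hres0, hpass]
            rw [show ((idx : Int) + 1) = ((idx + 1 : Nat) : Int) by push_cast; ring]
            exact heq
          · intro x hx
            exact hmono x (by rw [PySem.Set.mem_add]; exact Or.inl hx)
          · intro x hx
            have hxc : x ≠ c := fun e => hx (by simp [e])
            rw [hout x (fun hx' => hx (by simp [hx'])), PySem.Set.mem_add]
            simp [hxc]
          · rw [hres0, hpass, show residL st (c :: cs) checked' = residL st cs checked' by
              simp [residL, hmono c hmemadd]]
            exact hres
          · rw [hres0, hpass]
            simp only [List.length_cons]
            omega
      · -- wrong letter: skipped by both sides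
        have hchne : ch ≠ croakIdx idx := fun e => hcroak e.symm
        have hstep : frogInner st (c :: cs) checked (↑idx) crocked
            = frogInner st cs checked (↑idx) crocked := by
          rw [show frogInner st (c :: cs) checked (↑idx) crocked
              = (if PySem.Set.contains checked c then frogInner st cs checked (↑idx) crocked
                 else if PySem.Str.pyGet? "croak" (↑idx) ≠ PySem.Str.pyGet? st c
                 then frogInner st cs checked (↑idx) crocked
                 else if ((idx : Int) + 1 = 5)
                      then frogInner st cs (PySem.Set.add checked c) 0 true
                      else frogInner st cs (PySem.Set.add checked c) ((idx : Int) + 1) crocked)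
              from rfl]
          rw [pyGet?_croak idx hidx, hch]
          simp [hmem, hcroak]
        obtain ⟨checked', heq, hmono, hout, hres, hlen⟩ := ih checked idx crocked hidx hnd' hin'
        have hmem' : c ∉ checked' := fun hc' => hmem ((hout c hc_notin).mp hc')
        refine ⟨checked', ?_, hmono, ?_, ?_, ?_⟩
        · rw [hstep, heq, hres0, cpass_skip_1 idx ch _ hchne]
          rw [show (cpass idx (ch :: residL st cs checked)).2.1 = (cpass idx (residL st cs checked)).2.1
              by rw [cpass_skip idx ch _ hchne]]
        · intro x hx
          exact hout x (fun hx' => hx (by simp [hx']))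
        · rw [hres0, cpass_skip_22 idx ch _ hchne,
            show residL st (c :: cs) checked' = ch :: residL st cs checked' by
              simp [residL, hmem', hch2]]
          rw [hres]
        · rw [hres0, cpass_skip_22 idx ch _ hchne]
          simp only [List.length_cons]
          omega

-- B's result is -1 or nonnegative (its best only grows and starts nonnegative)
lemma altGe (l : List Char) : ∀ wc wr wo wa b : Int, 0 ≤ b →
    frogAltGo l wc wr wo wa b = -1 ∨ 0 ≤ frogAltGo l wc wr wo wa b := by
  induction l with
  | nil =>
    intro wc wr wo wa b hb
    simp only [frogAltGo]
    split_ifs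
    · exact Or.inl rfl
    · exact Or.inr hb
  | cons ch t ih =>
    intro wc wr wo wa b hb
    simp only [frogAltGo]
    split_ifs
    all_goals first
      | (left; rfl)
      | (exact ih _ _ _ _ _ hb)
      | (exact ih _ _ _ _ _ (by omega))

-- ===== the outer loop =====
lemma outer (st : String) (fuel : Nat) (checked : PySem.Set Int) (frogs : Int)
    (hfuel : (residL st (PySem.List.pyRange 0 (PySem.Str.len st) 1) checked).length + 1 ≤ fuel)
    (hinv : checked.length + (residL st (PySem.List.pyRange 0 (PySem.Str.len st) 1) checked).length
            = st.toList.length)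
    (hne : residL st (PySem.List.pyRange 0 (PySem.Str.len st) 1) checked ≠ []) :
    frogLoop st fuel checked 0 frogs =
      if frogAltGo (residL st (PySem.List.pyRange 0 (PySem.Str.len st) 1) checked) 0 0 0 0 0 = -1
      then -1
      else frogs + frogAltGo (residL st (PySem.List.pyRange 0 (PySem.Str.len st) 1) checked) 0 0 0 0 0 := by
  revert hfuel hinv hne
  induction fuel generalizing checked frogs with
  | zero =>
    intro hfuel _ _
    omega
  | succ fuel ih =>
    intro hfuel hinv hne
    have hin : ∀ c ∈ PySem.List.pyRange 0 (PySem.Str.len st) 1, (PySem.Str.pyGet? st c).isSome := by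
      intro c hc
      rw [PySem.List.mem_pyRange_one] at hc
      rw [PySem.Str.len_eq] at hc
      rw [show PySem.Str.pyGet? st c = PySem.List.pyGet? st.toList c from by
        simp [PySem.Str.pyGet?]]
      rw [Option.isSome_iff_ne_none]
      intro hnone
      rw [PySem.List.pyGet?_eq_none_iff] at hnone
      apply hnone
      unfold PySem.Raise.InRange
      omega
    obtain ⟨checked', heq, hmono, hout, hres, hlen⟩ :=
      bridge st (PySem.List.pyRange 0 (PySem.Str.len st) 1) checked 0 false (by omega)
        (PySem.List.nodup_pyRange_one _ _) hin
    simp only [Nat.cast_zero] at heq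
    obtain ⟨ch, t0, hr0⟩ : ∃ ch t0,
        residL st (PySem.List.pyRange 0 (PySem.Str.len st) 1) checked = ch :: t0 := by
      cases hr : residL st (PySem.List.pyRange 0 (PySem.Str.len st) 1) checked with
      | nil => exact absurd hr hne
      | cons a b => exact ⟨a, b, rfl⟩
    rw [show frogLoop st (fuel + 1) checked 0 frogs
        = (match frogInner st (PySem.List.pyRange 0 (PySem.Str.len st) 1) checked 0 false with
           | (checked, idx, crocked) =>
             if crocked = false ∨ idx ≠ 0 then -1
             else if PySem.Set.len checked = PySem.Str.len st then frogs + 1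
             else frogLoop st fuel checked idx (frogs + 1)) from rfl]
    rw [heq]
    dsimp only
    have hcl := (cpass_len 0 (residL st (PySem.List.pyRange 0 (PySem.Str.len st) 1) checked)
      (by omega)).2
    by_cases hstop : (cpass 0 (residL st (PySem.List.pyRange 0 (PySem.Str.len st) 1) checked)).2.1 = 0
        ∨ (cpass 0 (residL st (PySem.List.pyRange 0 (PySem.Str.len st) 1) checked)).1 ≠ 0
    · -- A stops with -1 here; B also yields -1 on the residual string
      have hB : frogAltGo (residL st (PySem.List.pyRange 0 (PySem.Str.len st) 1) checked) 0 0 0 0 0 = -1 := by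
        by_cases hch : ch = 'c'
        · subst hch
          have hcons : cpass 0 ('c' :: t0) = cpass 1 t0 := by
            rw [cpass_consume 0 'c' t0 rfl (by omega)]
          have hcl1 := (cpass_len 1 t0 (by omega)).1
          have hC : (cpass 0 ('c' :: t0)).1 ≠ 0
              ∨ frogAltGo (cpass 0 ('c' :: t0)).2.2 0 0 0 0 0 = -1 := by
            rw [hr0] at hstop
            rcases hstop with h | h
            · left
              rw [hcons]
              have h2 : (cpass 1 t0).2.1 = 0 := by rw [← hcons]; exact h
              omega
            · left
              exact h
          rw [hr0, topcore, if_pos hC]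
        · rw [hr0]
          exact headNe ch t0 hch
      have hA : (false || decide (0 < (cpass 0 (residL st (PySem.List.pyRange 0 (PySem.Str.len st) 1) checked)).2.1)) = false
          ∨ ((cpass 0 (residL st (PySem.List.pyRange 0 (PySem.Str.len st) 1) checked)).1 : Int) ≠ 0 := by
        rcases hstop with h | h
        · left
          rw [h]
          rfl
        · right
          intro e
          exact h (by exact_mod_cast e)
      rw [if_pos hA, if_pos hB]
    · push_neg at hstop
      obtain ⟨hk, hi⟩ := hstop
      rw [if_neg (by
        intro hcd
        rcases hcd with h | h
        · rw [decide_eq_true (Nat.pos_of_ne_zero hk)] at h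
          exact absurd h (by simp)
        · exact h (by rw [hi]; rfl))]
      have hlen2 : checked'.length + (cpass 0 (residL st (PySem.List.pyRange 0 (PySem.Str.len st) 1) checked)).2.2.length
          = st.toList.length := by omega
      rw [hi]
      simp only [Nat.cast_zero]
      by_cases hrnil : (cpass 0 (residL st (PySem.List.pyRange 0 (PySem.Str.len st) 1) checked)).2.2 = []
      · -- everything consumed: A answers frogs+1, and B answers 1 on the residual string
        have hch : ch = 'c' := by
          by_contra hch
          rw [hr0, cpass_skip_22 0 ch t0 hch] at hrnil
          exact List.cons_ne_nil _ _ hrnil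
        subst hch
        have hrlen0 : (cpass 0 (residL st (PySem.List.pyRange 0 (PySem.Str.len st) 1) checked)).2.2.length = 0 := by
          rw [hrnil]
          rfl
        rw [if_pos (by
          rw [PySem.Set.len, PySem.Str.len_eq]
          exact congrArg _ (by omega : checked'.length = st.toList.length))]
        have htc := topcore t0
        rw [← hr0] at htc
        have hBnil : frogAltGo (cpass 0 (residL st (PySem.List.pyRange 0 (PySem.Str.len st) 1) checked)).2.2 0 0 0 0 0 = 0 := by
          rw [hrnil]
          simp [frogAltGo]
        have hB1 : frogAltGo (residL st (PySem.List.pyRange 0 (PySem.Str.len st) 1) checked) 0 0 0 0 0 = 1 := by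
          rw [htc, if_neg (by
            intro hcd
            rcases hcd with h | h
            · exact h hi
            · rw [hBnil] at h
              exact absurd h (by norm_num)), hBnil]
          norm_num
        rw [hB1]
        rw [if_neg (by norm_num)]
      · rw [if_neg (by
          rw [PySem.Set.len, PySem.Str.len_eq]
          intro hEq
          have hcle : checked'.length = st.toList.length := by exact_mod_cast hEq
          have : (cpass 0 (residL st (PySem.List.pyRange 0 (PySem.Str.len st) 1) checked)).2.2.length = 0 := by
            omega
          exact hrnil (List.length_eq_zero_iff.mp this))]
        have hrec := ih checked' (frogs + 1)
          (by
            rw [hres]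
            have hk1 : 1 ≤ (cpass 0 (residL st (PySem.List.pyRange 0 (PySem.Str.len st) 1) checked)).2.1 :=
              Nat.pos_of_ne_zero hk
            omega)
          (by rw [hres]; exact hlen2)
          (by rw [hres]; exact hrnil)
        rw [hres] at hrec
        rw [hrec]
        by_cases hch : ch = 'c'
        · subst hch
          have htc := topcore t0
          rw [← hr0] at htc
          by_cases hBr : frogAltGo (cpass 0 (residL st (PySem.List.pyRange 0 (PySem.Str.len st) 1) checked)).2.2 0 0 0 0 0 = -1
          · rw [if_pos hBr]
            rw [show frogAltGo (residL st (PySem.List.pyRange 0 (PySem.Str.len st) 1) checked) 0 0 0 0 0 = -1 from by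
              rw [htc, if_pos (Or.inr hBr)]]
            simp
          · have hge : 0 ≤ frogAltGo (cpass 0 (residL st (PySem.List.pyRange 0 (PySem.Str.len st) 1) checked)).2.2 0 0 0 0 0 := by
              rcases altGe (cpass 0 (residL st (PySem.List.pyRange 0 (PySem.Str.len st) 1) checked)).2.2 0 0 0 0 0 le_rfl with h | h
              · exact absurd h hBr
              · exact h
            rw [if_neg hBr]
            rw [show frogAltGo (residL st (PySem.List.pyRange 0 (PySem.Str.len st) 1) checked) 0 0 0 0 0
                = frogAltGo (cpass 0 (residL st (PySem.List.pyRange 0 (PySem.Str.len st) 1) checked)).2.2 0 0 0 0 0 + 1 from by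
              rw [htc, if_neg (by
                intro hcd
                rcases hcd with h | h
                · exact h hi
                · exact hBr h)]]
            rw [if_neg (by omega)]
            omega
        · have hB0 : frogAltGo (residL st (PySem.List.pyRange 0 (PySem.Str.len st) 1) checked) 0 0 0 0 0 = -1 := by
            rw [hr0]
            exact headNe ch t0 hch
          have hBr : frogAltGo (cpass 0 (residL st (PySem.List.pyRange 0 (PySem.Str.len st) 1) checked)).2.2 0 0 0 0 0 = -1 := by
            rw [hr0, cpass_skip_22 0 ch t0 hch]
            exact headNe ch _ hch
          rw [hB0, hBr]
          simp

lemma filterMap_getElem?_range (l : List Char) :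
    (List.range l.length).filterMap (fun k => l[k]?) = l := by
  induction l with
  | nil => simp
  | cons a t ih =>
    simp [List.range_succ_eq_map, List.filterMap_map]
    exact ih

lemma residL_empty (st : String) :
    residL st (PySem.List.pyRange 0 (PySem.Str.len st) 1) PySem.Set.empty = st.toList := by
  unfold residL
  have h1 : ∀ c : Int, (!PySem.Set.contains (PySem.Set.empty (α := Int)) c) = true := by
    intro c; simp [PySem.Set.contains, PySem.Set.empty]
  rw [List.filter_eq_self.mpr (fun c _ => h1 c)]
  rw [PySem.List.pyRange_one, PySem.Str.len_eq]
  rw [List.filterMap_map]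
  have h2 : ((fun c => PySem.Str.pyGet? st c) ∘ fun k : Nat => (0 : Int) + ↑k)
      = fun k : Nat => st.toList[k]? := by
    funext k
    simp [PySem.Str.pyGet?]
  rw [show ((st.toList.length : Int) - 0).toNat = st.toList.length by omega, h2]
  exact filterMap_getElem?_range st.toList

-- ===== VERDICT (by name: the statement is the Claim_ definition above) =====
theorem frog_spec : Claim_equal_frog := by
  intro st _ hpre
  unfold Spec_frog frog frog_alt
  have hne : st.toList ≠ [] := fun h => hpre (String.toList_eq_nil_iff.mp h)
  have hre := residL_empty st
  have h := outer st (st.toList.length + 1) PySem.Set.empty 0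
    (by rw [hre])
    (by rw [hre]; simp [PySem.Set.empty])
    (by rw [hre]; exact hne)
  rw [hre] at h
  rw [h]
  split_ifs with hh
  · omega
  · omega
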